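-- pv_equiv track=rewrite | github.com/adminatthebunker/sovpro | services/scanner/src/legislative/ab_former_mlas.py | _latest_constituency
-- ===== SOURCE A (Python) =====
-- from typing import Optional
--
-- def _latest_constituency(constituency_history: list[dict]) -> Optional[str]:
--     """Pick the constituency from the most-recent successful election."""
--     elected = [c for c in constituency_history if (c.get("result") or "").lower() == "elected"]
--     pool = elected or constituency_history
--     if not pool:
--         return None
--     def sort_key(c: dict) -> str:
--         return c.get("election_date") or ""
--     sorted_c = sorted(pool, key=sort_key, reverse=True)
--     return sorted_c[0].get("constituency") or None
-- ===== SOURCE B (Python) =====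
-- from typing import Optional
--
-- def _latest_constituency(constituency_history: list[dict]) -> Optional[str]:
--     """Pick the constituency from the most-recent successful election."""
--     if not constituency_history:
--         return None
--     best = max(constituency_history,
--                key=lambda c: ((c.get("result") or "").lower() == "elected",
--                               c.get("election_date") or ""))
--     return best.get("constituency") or None
-- ===== Notes on version B (the rewrite author's own statement) =====
-- stated objective: simpler
-- what changed: Replaced A's filter-elected / fallback / stable-reverse-sort / take-head pipeline with an empty guard plus a single max() pass over the whole list using the composite key (is_elected, election_date), so the filter and the sort disappear.
import Mathlib
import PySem

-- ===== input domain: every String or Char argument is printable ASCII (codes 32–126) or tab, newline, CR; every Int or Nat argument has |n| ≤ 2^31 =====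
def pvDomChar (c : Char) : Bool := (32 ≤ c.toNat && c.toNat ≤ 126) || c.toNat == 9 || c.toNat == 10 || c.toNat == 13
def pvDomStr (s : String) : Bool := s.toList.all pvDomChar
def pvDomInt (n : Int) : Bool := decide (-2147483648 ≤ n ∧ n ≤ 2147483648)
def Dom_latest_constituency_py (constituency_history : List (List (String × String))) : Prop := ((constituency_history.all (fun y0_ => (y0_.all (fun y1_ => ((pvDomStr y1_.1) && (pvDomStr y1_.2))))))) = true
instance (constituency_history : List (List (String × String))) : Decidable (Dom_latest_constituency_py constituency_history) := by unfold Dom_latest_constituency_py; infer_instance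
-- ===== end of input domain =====

-- B is simpler: it replaces A's filter-elected / fallback / stable-reverse-sort / take-head pipeline
-- with an empty guard plus one max() pass keyed by the composite (is_elected, election_date).

-- ===== PORT A =====
-- (c.get("result") or "").lower() == "elected"   (a missing key and "" both fail the test)
def pvIsElected (c : List (String × String)) : Bool :=
  PySem.Str.lower (((PySem.Dict.mk c).get? "result").getD "") == "elected"

-- sort_key(c) = c.get("election_date") or ""   (a missing key and "" both yield "")
def pvDateKey (c : List (String × String)) : String :=
  ((PySem.Dict.mk c).get? "election_date").getD ""

-- c.get("constituency") or None   (a missing key and "" both yield None)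
def pvConstituency (c : List (String × String)) : Option String :=
  let v := ((PySem.Dict.mk c).get? "constituency").getD ""
  if v == "" then none else some v

def latest_constituency_py (constituency_history : List (List (String × String))) : Option String :=
  let elected := constituency_history.filter pvIsElected
  let pool := if elected.isEmpty then constituency_history else elected
  if pool.isEmpty then none
  else
    let sorted_c := PySem.List.sorted pool pvDateKey true
    match sorted_c with
    | [] => none            -- unreachable: pool is nonempty
    | m :: _ => pvConstituency m

-- ===== PORT B =====
def latest_constituency_py_alt (constituency_history : List (List (String × String))) : Option String :=
  match constituency_history with
  | [] => none
  | _ =>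
    match PySem.List.max2? constituency_history pvIsElected pvDateKey with
    | some best => pvConstituency best
    | none => none          -- unreachable: the list is nonempty

-- ===== PRECONDITION & SPEC =====
def Spec_latest_constituency_py (constituency_history : List (List (String × String))) (out : Option String) : Prop := out = latest_constituency_py_alt constituency_history
instance (constituency_history : List (List (String × String))) (out : Option String) : Decidable (Spec_latest_constituency_py constituency_history out) := by unfold Spec_latest_constituency_py; infer_instance

-- ===== CLAIM (what is proved, stated in full; the proofs are below) =====
def Claim_equal_latest_constituency_py : Prop := ∀ (constituency_history : List (List (String × String))), Dom_latest_constituency_py constituency_history → Spec_latest_constituency_py constituency_history (latest_constituency_py constituency_history)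

-- ===== LEMMAS AND PROOFS =====

-- head of one reverse insertion step depends only on the head of the accumulator
theorem head?_insertBy_rev {α κ : Type} [LinearOrder κ] (key : α → κ) (x : α) (acc : List α) :
    (PySem.List.insertBy (fun a b => decide (key b < key a)) x acc).head? =
      (match acc.head? with
       | none => some x
       | some m => if key m < key x then some x else some m) := by
  cases acc with
  | nil => simp [PySem.List.insertBy]
  | cons y ys =>
    simp only [PySem.List.insertBy, List.head?]
    split_ifs with h <;> simp_all

theorem head?_foldl_insertBy_rev {α κ : Type} [LinearOrder κ] (key : α → κ) (xs acc : List α) :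
    (xs.foldl (fun acc x => PySem.List.insertBy (fun a b => decide (key b < key a)) x acc) acc).head? =
      xs.foldl (fun acc x =>
        match acc with
        | none => some x
        | some m => if key m < key x then some x else some m) acc.head? := by
  induction xs generalizing acc with
  | nil => rfl
  | cons x t ih =>
    simp only [List.foldl_cons]
    rw [ih, head?_insertBy_rev]

-- the head of Python's stable reverse sort IS Python's max (first extremal element)
theorem head?_sorted_rev_eq_max? {α κ : Type} [LinearOrder κ] (xs : List α) (key : α → κ) :
    (PySem.List.sorted xs key true).head? = PySem.List.max? xs key := by
  simp only [PySem.List.sorted, PySem.List.max?]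
  exact head?_foldl_insertBy_rev key xs []

-- when no element satisfies k1, the composite-key argmax loop is the plain k2 argmax loop
theorem foldl_max2_all_false {α κ : Type} [LinearOrder κ]
    (k1 : α → Bool) (k2 : α → κ) (xs : List α) (h : ∀ x ∈ xs, k1 x = false) :
    ∀ acc : Option α, (∀ m, acc = some m → k1 m = false) →
      xs.foldl (fun acc x =>
        match acc with
        | none => some x
        | some m => if (decide (k1 m < k1 x) || !decide (k1 x < k1 m) && decide (k2 m < k2 x)) = true then some x else some m) acc =
      xs.foldl (fun acc x =>
        match acc with
        | none => some x
        | some m => if k2 m < k2 x then some x else some m) acc := by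
  induction xs with
  | nil => intro acc _; rfl
  | cons x t ih =>
    intro acc hacc
    have hx : k1 x = false := h x (by simp)
    have ht : ∀ y ∈ t, k1 y = false := fun y hy => h y (by simp [hy])
    cases acc with
    | none =>
      simp only [List.foldl_cons]
      exact ih ht (some x) (fun m hm => by cases hm; exact hx)
    | some m =>
      have hm : k1 m = false := hacc m rfl
      simp only [List.foldl_cons, hx, hm,
        show decide ((false:Bool) < false) = false from by decide,
        Bool.not_false, Bool.true_and, Bool.false_or, decide_eq_true_eq]
      by_cases hlt : k2 m < k2 x
      · simp only [hlt, if_true]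
        exact ih ht (some x) (fun m' hm' => by cases hm'; exact hx)
      · simp only [hlt, if_false]
        exact ih ht (some m) (fun m' hm' => by cases hm'; exact hm)

-- once the accumulator holds a k1-satisfying element, k1-failing elements are simply skipped
theorem foldl_max2_elected {α κ : Type} [LinearOrder κ]
    (k1 : α → Bool) (k2 : α → κ) (t : List α) :
    ∀ m, k1 m = true →
      t.foldl (fun acc x =>
        match acc with
        | none => some x
        | some m => if (decide (k1 m < k1 x) || !decide (k1 x < k1 m) && decide (k2 m < k2 x)) = true then some x else some m) (some m) =
      (t.filter k1).foldl (fun acc x =>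
        match acc with
        | none => some x
        | some m => if k2 m < k2 x then some x else some m) (some m) := by
  induction t with
  | nil => intro m _; rfl
  | cons x t ih =>
    intro m hm
    by_cases hx : k1 x = true
    · simp only [List.foldl_cons, List.filter_cons, hx, if_pos, hm,
        show decide ((true:Bool) < true) = false from by decide,
        Bool.not_false, Bool.true_and, Bool.false_or, decide_eq_true_eq]
      by_cases hlt : k2 m < k2 x
      · simp only [hlt, if_true, List.foldl_cons]
        exact ih x hx
      · simp only [hlt, if_false, List.foldl_cons]
        exact ih m hm
    · simp only [Bool.not_eq_true] at hx
      simp only [List.foldl_cons, List.filter_cons, hx, hm,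
        show decide ((true:Bool) < false) = false from by decide,
        show decide ((false:Bool) < true) = true from by decide,
        Bool.not_true, Bool.false_and, Bool.or_false, Bool.false_eq_true, if_false]
      exact ih m hm

-- with at least one k1-satisfying element, the composite argmax is the k2 argmax of the filtered list
theorem foldl_max2_filter_ne_nil {α κ : Type} [LinearOrder κ]
    (k1 : α → Bool) (k2 : α → κ) (xs : List α) (h : xs.filter k1 ≠ []) :
    ∀ acc : Option α, (∀ m, acc = some m → k1 m = false) →
      xs.foldl (fun acc x =>
        match acc with
        | none => some x
        | some m => if (decide (k1 m < k1 x) || !decide (k1 x < k1 m) && decide (k2 m < k2 x)) = true then some x else some m) acc =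
      (xs.filter k1).foldl (fun acc x =>
        match acc with
        | none => some x
        | some m => if k2 m < k2 x then some x else some m) none := by
  induction xs with
  | nil => exact absurd rfl h
  | cons x t ih =>
    intro acc hacc
    by_cases hx : k1 x = true
    · have step := foldl_max2_elected k1 k2 t x hx
      cases acc with
      | none =>
        simp only [List.foldl_cons, List.filter_cons, hx, if_pos]
        exact step
      | some m =>
        have hm : k1 m = false := hacc m rfl
        simp only [List.foldl_cons, List.filter_cons, hx, hm,
          show decide ((false:Bool) < true) = true from by decide,
          Bool.true_or, if_pos, if_true]
        exact step
    · simp only [Bool.not_eq_true] at hx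
      have ht : t.filter k1 ≠ [] := by
        simpa [List.filter_cons, hx] using h
      cases acc with
      | none =>
        simp only [List.foldl_cons, List.filter_cons, hx, Bool.false_eq_true, if_false]
        exact ih ht (some x) (fun m' hm' => by cases hm'; exact hx)
      | some m =>
        have hm : k1 m = false := hacc m rfl
        simp only [List.foldl_cons, List.filter_cons, hx, hm,
          show decide ((false:Bool) < false) = false from by decide,
          Bool.not_false, Bool.true_and, Bool.false_or, decide_eq_true_eq,
          Bool.false_eq_true, if_false]
        by_cases hlt : k2 m < k2 x
        · simp only [hlt, if_true]
          exact ih ht (some x) (fun m' hm' => by cases hm'; exact hx)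
        · simp only [hlt, if_false]
          exact ih ht (some m) (fun m' hm' => by cases hm'; exact hm)

-- B's composite-key max equals the plain date max over A's pool (elected if any, else all)
theorem max2?_eq_max?_filter_or_all (xs : List (List (String × String))) :
    PySem.List.max2? xs pvIsElected pvDateKey =
      PySem.List.max? (if (xs.filter pvIsElected).isEmpty then xs else xs.filter pvIsElected) pvDateKey := by
  by_cases he : xs.filter pvIsElected = []
  · have hall : ∀ x ∈ xs, pvIsElected x = false := by
      intro x hx
      by_contra hc
      have hx' : pvIsElected x = true := by simpa using hc
      have : x ∈ xs.filter pvIsElected := List.mem_filter.mpr ⟨hx, hx'⟩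
      simp [he] at this
    simp only [he, List.isEmpty_nil, if_pos, PySem.List.max2?, PySem.List.max?]
    exact foldl_max2_all_false _ _ _ hall none (by simp)
  · have : (xs.filter pvIsElected).isEmpty = false := by
      simpa [List.isEmpty_iff] using he
    simp only [this, Bool.false_eq_true, if_false, PySem.List.max2?, PySem.List.max?]
    exact foldl_max2_filter_ne_nil _ _ _ he none (by simp)

theorem latest_constituency_eq (l : List (List (String × String))) :
    latest_constituency_py l = latest_constituency_py_alt l := by
  cases l with
  | nil => rfl
  | cons a t =>
    simp only [latest_constituency_py, latest_constituency_py_alt]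
    rw [max2?_eq_max?_filter_or_all]
    set pool := if ((a :: t).filter pvIsElected).isEmpty then a :: t else (a :: t).filter pvIsElected with hpool
    have hpne : pool ≠ [] := by
      rw [hpool]; split
      · simp
      · next h => simpa [List.isEmpty_iff] using h
    have hne : pool.isEmpty = false := by simpa [List.isEmpty_iff] using hpne
    rw [hne]
    simp only [Bool.false_eq_true, if_false]
    have hhead := head?_sorted_rev_eq_max? pool pvDateKey
    cases hs : PySem.List.sorted pool pvDateKey true with
    | nil => exact absurd ((PySem.List.sorted_eq_nil_iff pool pvDateKey true).mp hs) hpne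
    | cons m tt =>
      rw [hs] at hhead
      rw [← hhead]
      rfl

-- ===== VERDICT (by name: the statement is the Claim_ definition above) =====
theorem latest_constituency_py_spec : Claim_equal_latest_constituency_py := by
  intro l _
  exact latest_constituency_eq l
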